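-- pv_equiv track=rewrite | github.com/JakubTom1/Multicriterial_Optimalization | Lab2/main.py | find_ideal_point
-- ===== SOURCE A (Python) =====
-- def find_ideal_point(points):
--     if not points:
--         return None
--     dim = len(points[0])
--     ideal_point = []
--     for d in range(dim):
--         ideal_point.append(min(point[d] for point in points))
--     return tuple(ideal_point)
-- ===== SOURCE B (Python) =====
-- def find_ideal_point(points):
--     if not points:
--         return None
--     running = list(points[0])
--     for point in points[1:]:
--         for d in range(len(running)):
--             if point[d] < running[d]:
--                 running[d] = point[d]
--     return tuple(running)
-- ===== Notes on version B (the rewrite author's own statement) =====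
-- stated objective: faster
-- what changed: B makes one pass over the points maintaining a running per-dimension minimum list updated in place, instead of A's dim separate min-scans each building a generator over all points.
import Mathlib
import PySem

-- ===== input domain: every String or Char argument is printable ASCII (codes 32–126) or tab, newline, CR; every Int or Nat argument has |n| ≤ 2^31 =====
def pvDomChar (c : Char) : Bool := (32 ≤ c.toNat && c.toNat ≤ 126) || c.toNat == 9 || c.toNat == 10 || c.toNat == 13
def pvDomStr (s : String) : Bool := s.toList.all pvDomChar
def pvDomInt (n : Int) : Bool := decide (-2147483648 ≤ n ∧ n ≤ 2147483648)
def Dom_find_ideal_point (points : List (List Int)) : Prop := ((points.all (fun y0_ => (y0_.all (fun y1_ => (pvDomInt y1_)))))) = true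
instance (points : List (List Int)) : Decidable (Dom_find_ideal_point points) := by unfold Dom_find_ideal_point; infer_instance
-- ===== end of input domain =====

-- B makes one pass over the points keeping a running per-dimension minimum, instead of A's one min-scan per dimension; same asymptotic cost.


-- ===== PORT A =====
def find_ideal_point (points : List (List Int)) : Option (List Int) :=
  if points = [] then none
  else
    let dim : Int := ((points.headD []).length : Int)
    some ((PySem.List.pyRange 0 dim 1).foldl
      (fun acc d =>
        acc ++ [ (PySem.List.min? (points.map (fun point => PySem.List.pyGetD point d 0)) (fun x => x)).getD 0 ])
      [])

-- ===== PORT B =====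
-- inner loop: 'for d in range(len(running)): if point[d] < running[d]: running[d] = point[d]'
def pvInner (running point : List Int) : List Int :=
  (PySem.List.pyRange 0 ((running.length : Int)) 1).foldl
    (fun r d =>
      if PySem.List.pyGetD point d 0 < PySem.List.pyGetD r d 0 then
        PySem.List.pySetD r d (PySem.List.pyGetD point d 0)
      else r)
    running

def find_ideal_point_alt (points : List (List Int)) : Option (List Int) :=
  match points with
  | [] => none
  | p0 :: rest => some (rest.foldl pvInner p0)

-- ===== PRECONDITION & SPEC =====
-- Pre_ excludes exactly the ragged inputs on which Python A raises IndexError: some later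
-- point shorter than the first point (B raises there too).
def Pre_find_ideal_point (points : List (List Int)) : Prop :=
  ∀ p ∈ points.tail, (points.headD []).length ≤ p.length
instance (points : List (List Int)) : Decidable (Pre_find_ideal_point points) := by
  unfold Pre_find_ideal_point; infer_instance
def pvWitness_find_ideal_point : List (List Int) := [[3, 5], [1, 7], [2, 2]]
def Spec_find_ideal_point (points : List (List Int)) (out : Option (List Int)) : Prop := out = find_ideal_point_alt points
instance (points : List (List Int)) (out : Option (List Int)) : Decidable (Spec_find_ideal_point points out) := by unfold Spec_find_ideal_point; infer_instance

-- ===== CLAIM (what is proved, stated in full; the proofs are below) =====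
def Claim_equal_find_ideal_point : Prop := ∀ (points : List (List Int)), Dom_find_ideal_point points → Pre_find_ideal_point points → Spec_find_ideal_point points (find_ideal_point points)

-- ===== LEMMAS AND PROOFS =====

-- the body of B's inner fold
def pvStep (point : List Int) (r : List Int) (d : Int) : List Int :=
  if PySem.List.pyGetD point d 0 < PySem.List.pyGetD r d 0 then
    PySem.List.pySetD r d (PySem.List.pyGetD point d 0)
  else r

theorem pvStep_length (point r : List Int) (d : Int) : (pvStep point r d).length = r.length := by
  unfold pvStep; split
  · exact PySem.List.length_pySetD r d _
  · rfl

theorem pvFold_step_length (point : List Int) (l : List Int) (r : List Int) :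
    (l.foldl (pvStep point) r).length = r.length := by
  induction l generalizing r with
  | nil => rfl
  | cons d t ih => simp [List.foldl_cons, ih, pvStep_length]

theorem pvStep_getD (point r : List Int) (a i : Nat) (ha : a < r.length) (hi : i < r.length) :
    (pvStep point r (a : Int)).getD i 0 =
      if i = a then min (point.getD a 0) (r.getD a 0) else r.getD i 0 := by
  unfold pvStep
  simp only [PySem.List.pyGetD_natCast, PySem.List.pySetD_natCast]
  by_cases hia : i = a
  · subst hia
    rw [if_pos rfl]
    split_ifs with hcond
    · rw [List.getD_eq_getElem _ _ (by simpa using hi), List.getElem_set_self (by simpa using hi),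
          min_eq_left hcond.le]
    · rw [min_eq_right (not_lt.1 hcond)]
  · rw [if_neg hia]
    split_ifs with hcond
    · rw [List.getD_eq_getElem _ _ (by simpa using hi),
          List.getElem_set_ne (fun h => hia h.symm), List.getD_eq_getElem _ _ hi]
    · rfl

-- the inner index loop computes a pointwise minimum on the indices [a, n)
theorem pvInner_range_getD (point : List Int) (n : Nat) :
    ∀ (k a : Nat) (r : List Int), r.length = n → a + k = n → ∀ j : Nat, j < n →
    ((PySem.List.pyRange (a : Int) (n : Int) 1).foldl (pvStep point) r).getD j 0 =
      if a ≤ j then min (point.getD j 0) (r.getD j 0) else r.getD j 0 := by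
  intro k
  induction k with
  | zero =>
    intro a r hr ha j hj
    rw [PySem.List.pyRange_one_eq_nil (by omega : (n : Int) ≤ (a : Int))]
    rw [if_neg (by omega : ¬ a ≤ j)]
    rfl
  | succ k ih =>
    intro a r hr ha j hj
    have hlt : (a : Int) < (n : Int) := by exact_mod_cast (by omega : a < n)
    rw [PySem.List.pyRange_one_cons hlt, List.foldl_cons,
        show ((a : Int) + 1) = ((a + 1 : Nat) : Int) by push_cast; ring]
    have hlen : (pvStep point r (a : Int)).length = n := by rw [pvStep_length, hr]
    rw [ih (a + 1) (pvStep point r (a : Int)) hlen (by omega) j hj,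
        pvStep_getD point r a j (by omega) (by omega)]
    by_cases hja : j = a
    · subst hja
      rw [if_neg (by omega : ¬ j + 1 ≤ j), if_pos rfl, if_pos (le_refl j)]
    · by_cases h2 : a ≤ j
      · rw [if_pos (by omega : a + 1 ≤ j), if_neg hja, if_pos h2]
      · rw [if_neg (by omega : ¬ a + 1 ≤ j), if_neg hja, if_neg h2]

theorem pvInner_getD (r point : List Int) (j : Nat) (hj : j < r.length) :
    (pvInner r point).getD j 0 = min (point.getD j 0) (r.getD j 0) := by
  unfold pvInner
  have h := pvInner_range_getD point r.length r.length 0 r rfl (by omega) j hj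
  simpa using h

theorem pvInner_length (r point : List Int) : (pvInner r point).length = r.length := by
  unfold pvInner
  have : (fun r d => pvStep point r d) = pvStep point := rfl
  exact pvFold_step_length point _ r

-- outer fold, elementwise: running minimum over the remaining points
theorem pvOuter_getD (rest : List (List Int)) :
    ∀ (r : List Int) (j : Nat), j < r.length →
    (rest.foldl pvInner r).getD j 0 =
      rest.foldl (fun m p => min m (p.getD j 0)) (r.getD j 0) := by
  induction rest with
  | nil => intro r j hj; rfl
  | cons p t ih =>
    intro r j hj
    rw [List.foldl_cons, List.foldl_cons,
        ih (pvInner r p) j (by rw [pvInner_length]; exact hj),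
        pvInner_getD r p j hj, min_comm]

theorem pvOuter_length (rest : List (List Int)) (r : List Int) :
    (rest.foldl pvInner r).length = r.length := by
  induction rest generalizing r with
  | nil => rfl
  | cons p t ih => rw [List.foldl_cons, ih, pvInner_length]

-- ===== VERDICT (by name: the statement is the Claim_ definition above) =====
theorem find_ideal_point_spec : Claim_equal_find_ideal_point := by
  unfold Claim_equal_find_ideal_point
  intro points _hdom _hpre
  unfold Spec_find_ideal_point find_ideal_point find_ideal_point_alt
  match points with
  | [] => rfl
  | p0 :: rest =>
    simp only [if_neg (List.cons_ne_nil p0 rest), List.headD_cons]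
    congr 1
    rw [PySem.List.foldl_append_singleton_eq_map]
    apply List.ext_getElem
    · simp [PySem.List.length_pyRange_one, pvOuter_length]
    · intro j hj1 hj2
      have hjd : j < p0.length := by
        have := pvOuter_length rest p0; omega
      simp only [List.nil_append]
      rw [List.getElem_map, PySem.List.getElem_pyRange_one]
      have hjr : j < (PySem.List.pyRange 0 (p0.length : Int) 1).length := by
        simpa [PySem.List.length_pyRange_one] using hjd
      simp only [zero_add]
      rw [show ((j : Int)) = ((j : Nat) : Int) from rfl]
      simp only [List.map_cons, PySem.List.pyGetD_natCast]
      rw [PySem.List.min?_id_cons]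
      simp only [Option.getD_some]
      rw [List.foldl_map]
      rw [← List.getD_eq_getElem _ 0 hj2, pvOuter_getD rest p0 j hjd]
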